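-- pv_equiv track=rewrite | github.com/MarcosMAlvarez/Python-Concepts | data_structure_algorithms/array_modulo.py | in_n_cube
-- ===== SOURCE A (Python) =====
-- def in_n_cube(array: list, k: int) -> int:
--     """Get minimum lenght subarray with sum % number == 0"""
--     # pylint: disable=invalid-name
--     n = len(array)
--     min_len = n + 1
--     for i in range(n):
--         for j in range(i, n):
--             if sum(array[i : j + 1]) % k == 0 and j - i + 1 < min_len:
--                 min_len = j - i + 1
--
--     return min_len
-- ===== SOURCE B (Python) =====
-- def in_n_cube(array: list, k: int) -> int:
--     """Get minimum lenght subarray with sum % number == 0"""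
--     n = len(array)
--     min_len = n + 1
--     last = {0: 0}  # remainder of a prefix sum -> latest prefix index with that remainder
--     prefix = 0
--     p = 0
--     for x in array:
--         p += 1
--         prefix += x
--         r = prefix % k
--         if r in last:
--             cand = p - last[r]
--             if cand < min_len:
--                 min_len = cand
--         last[r] = p
--     return min_len
-- ===== Notes on version B (the rewrite author's own statement) =====
-- stated objective: faster
-- what changed: Replaced the triple-nested scan (all (i,j) pairs with a fresh slice sum each) by a single pass over prefix-sum remainders with a dict mapping each remainder mod k to the latest prefix index, so the minimum length comes from one lookup per element.
import Mathlib
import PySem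

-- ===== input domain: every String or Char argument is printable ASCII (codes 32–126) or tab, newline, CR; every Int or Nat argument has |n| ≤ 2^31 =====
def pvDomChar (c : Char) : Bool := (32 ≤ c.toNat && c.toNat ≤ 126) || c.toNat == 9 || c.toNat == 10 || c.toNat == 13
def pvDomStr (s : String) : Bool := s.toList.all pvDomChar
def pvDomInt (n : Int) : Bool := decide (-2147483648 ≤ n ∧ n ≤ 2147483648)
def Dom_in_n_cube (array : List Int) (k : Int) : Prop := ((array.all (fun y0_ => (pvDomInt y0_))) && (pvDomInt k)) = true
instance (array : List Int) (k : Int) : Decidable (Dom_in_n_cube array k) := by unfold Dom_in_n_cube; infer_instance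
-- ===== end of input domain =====

-- B: one pass over prefix-sum remainders with a last-index dict, instead of A's triple-nested scan of all subarrays.


-- ===== PORT A =====
def in_n_cube (array : List Int) (k : Int) : Int :=
  let n : Int := array.length
  (PySem.List.pyRange 0 n 1).foldl (fun minLen i =>
    (PySem.List.pyRange i n 1).foldl (fun ml j =>
      if PySem.Int.mod ((PySem.List.slice array (some i) (some (j + 1))).sum) k = 0 ∧ j - i + 1 < ml
      then j - i + 1 else ml) minLen) (n + 1)

-- ===== PORT B =====
-- loop body of B's single pass (state: min_len, last, prefix, p)
def bStep (k : Int) (st : Int × PySem.Dict Int Int × Int × Int) (x : Int) :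
    Int × PySem.Dict Int Int × Int × Int :=
  let p := st.2.2.2 + 1
  let pfx := st.2.2.1 + x
  let r := PySem.Int.mod pfx k
  let m :=
    match st.2.1.get? r with
    | some q => if p - q < st.1 then p - q else st.1
    | none => st.1
  (m, st.2.1.insert r p, pfx, p)

def in_n_cube_alt (array : List Int) (k : Int) : Int :=
  let n : Int := array.length
  (array.foldl (bStep k) (n + 1, PySem.Dict.ofList [(0, 0)], 0, 0)).1

-- ===== PRECONDITION & SPEC =====
-- Pre_ excludes exactly the inputs where A raises ZeroDivisionError: k = 0 with a nonempty array
-- (with an empty array the loop body never runs and A returns 1 even for k = 0).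
def Pre_in_n_cube (array : List Int) (k : Int) : Prop := k ≠ 0 ∨ array = []
instance (array : List Int) (k : Int) : Decidable (Pre_in_n_cube array k) := by unfold Pre_in_n_cube; infer_instance
def pvWitness_in_n_cube : List Int × Int := ([1, 2, 3], 3)

def Spec_in_n_cube (array : List Int) (k : Int) (out : Int) : Prop := out = in_n_cube_alt array k
instance (array : List Int) (k : Int) (out : Int) : Decidable (Spec_in_n_cube array k out) := by unfold Spec_in_n_cube; infer_instance

-- ===== CLAIM (what is proved, stated in full; the proofs are below) =====
def Claim_equal_in_n_cube : Prop := ∀ (array : List Int) (k : Int), Dom_in_n_cube array k → Pre_in_n_cube array k → Spec_in_n_cube array k (in_n_cube array k)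

-- ===== LEMMAS AND PROOFS =====

-- prefix sum of the first q elements
def preS (l : List Int) (q : Nat) : Int := (l.take q).sum

-- (q, p) delimit a subarray (elements q..p-1 of array) whose sum is divisible by k
def VP (array : List Int) (k : Int) (q p : Nat) : Prop :=
  q < p ∧ p ≤ array.length ∧ k ∣ (preS array p - preS array q)

-- what the running minimum m is after all pairs with right end ≤ P have been considered
def MInv (array : List Int) (k : Int) (P : Nat) (m : Int) : Prop :=
  m ≤ (array.length : Int) + 1 ∧
  (∀ q p, VP array k q p → p ≤ P → m ≤ (p : Int) - (q : Int)) ∧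
  (m = (array.length : Int) + 1 ∨ ∃ q p, VP array k q p ∧ m = (p : Int) - (q : Int))

-- the dict maps each remainder to a prefix index realising it, no earlier than any other such index
def DInv (array : List Int) (k : Int) (P : Nat) (d : PySem.Dict Int Int) : Prop :=
  (∀ r v, d.get? r = some v → ∃ q : Nat, q ≤ P ∧ v = (q : Int) ∧ PySem.Int.mod (preS array q) k = r) ∧
  (∀ q : Nat, q ≤ P → ∃ v, d.get? (PySem.Int.mod (preS array q) k) = some v ∧ (q : Int) ≤ v)

lemma mod_eq_mod_iff_dvd (a b k : Int) (hk : k ≠ 0) :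
    PySem.Int.mod a k = PySem.Int.mod b k ↔ k ∣ (a - b) := by
  have ha := PySem.Int.floordiv_mul_add_mod a k
  have hb := PySem.Int.floordiv_mul_add_mod b k
  constructor
  · intro h
    exact ⟨PySem.Int.floordiv a k - PySem.Int.floordiv b k, by linear_combination -ha + hb + h⟩
  · rintro ⟨c, hc⟩
    have hdvd : PySem.Int.mod a k - PySem.Int.mod b k = k * (c - PySem.Int.floordiv a k + PySem.Int.floordiv b k) := by
      linear_combination ha - hb + hc
    have h0 : PySem.Int.mod a k - PySem.Int.mod b k = 0 := by
      rcases lt_or_gt_of_ne hk with hneg | hpos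
      · have b1 := PySem.Int.mod_neg_bounds a hneg
        have b2 := PySem.Int.mod_neg_bounds b hneg
        have : (-k) ∣ (PySem.Int.mod a k - PySem.Int.mod b k) := by
          exact (Int.neg_dvd).mpr ⟨_, hdvd⟩
        exact Int.eq_zero_of_abs_lt_dvd this (abs_lt.mpr ⟨by omega, by omega⟩)
      · have b1 := PySem.Int.mod_nonneg a hpos
        have b2 := PySem.Int.mod_nonneg b hpos
        have c1 := PySem.Int.mod_lt a hpos
        have c2 := PySem.Int.mod_lt b hpos
        exact Int.eq_zero_of_abs_lt_dvd ⟨_, hdvd⟩ (abs_lt.mpr ⟨by omega, by omega⟩)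
    omega

lemma sum_take_sub (l : List Int) (q p : Nat) (h : q ≤ p) :
    ((l.drop q).take (p - q)).sum = preS l p - preS l q := by
  have hsplit : l.take p = l.take q ++ (l.drop q).take (p - q) := by
    conv_lhs => rw [show p = q + (p - q) by omega]
    exact List.take_add
  unfold preS
  rw [hsplit, List.sum_append]
  ring

-- generic facts about the inner "keep the smaller length" fold
lemma min_fold_le_init {α : Type} (P : α → Prop) [DecidablePred P] (f : α → Int) (l : List α) (a : Int) :
    l.foldl (fun acc x => if P x ∧ f x < acc then f x else acc) a ≤ a := by
  induction l generalizing a with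
  | nil => simp
  | cons x t ih =>
    simp only [List.foldl_cons]
    refine le_trans (ih _) ?_
    split <;> omega

lemma min_fold_le_mem {α : Type} (P : α → Prop) [DecidablePred P] (f : α → Int) (l : List α) (a : Int)
    (x : α) (hx : x ∈ l) (hP : P x) :
    l.foldl (fun acc x => if P x ∧ f x < acc then f x else acc) a ≤ f x := by
  induction l generalizing a with
  | nil => simp at hx
  | cons y t ih =>
    simp only [List.foldl_cons]
    rcases List.mem_cons.mp hx with rfl | hxt
    · refine le_trans (min_fold_le_init P f t _) ?_
      by_cases hfa : f x < a
      · rw [if_pos ⟨hP, hfa⟩]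
      · rw [if_neg (by tauto)]; omega
    · exact ih _ hxt

lemma min_fold_cases {α : Type} (P : α → Prop) [DecidablePred P] (f : α → Int) (l : List α) (a : Int) :
    l.foldl (fun acc x => if P x ∧ f x < acc then f x else acc) a = a ∨
    ∃ x ∈ l, P x ∧ l.foldl (fun acc x => if P x ∧ f x < acc then f x else acc) a = f x := by
  induction l generalizing a with
  | nil => exact Or.inl rfl
  | cons y t ih =>
    simp only [List.foldl_cons]
    by_cases h : P y ∧ f y < a
    · rcases ih (f y) with h1 | ⟨x, hx, hPx, hfx⟩
      · right; exact ⟨y, List.mem_cons_self .., h.1, by simp [if_pos h, h1]⟩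
      · right; exact ⟨x, List.mem_cons_of_mem _ hx, hPx, by simp [if_pos h, hfx]⟩
    · rcases ih a with h1 | ⟨x, hx, hPx, hfx⟩
      · left; simp [if_neg h, h1]
      · right; exact ⟨x, List.mem_cons_of_mem _ hx, hPx, by simp [if_neg h, hfx]⟩

-- generic facts about a fold whose step never increases the accumulator
lemma dec_fold_le_init (g : Int → Int → Int) (l : List Int) (a : Int)
    (hg : ∀ m x, g m x ≤ m) : l.foldl g a ≤ a := by
  induction l generalizing a with
  | nil => simp
  | cons x t ih => exact le_trans (ih _) (hg a x)

lemma dec_fold_le_mem (g : Int → Int → Int) (l : List Int) (a : Int)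
    (hg : ∀ m x, g m x ≤ m) (x : Int) (hx : x ∈ l) (c : Int) (hc : ∀ m, g m x ≤ c) :
    l.foldl g a ≤ c := by
  induction l generalizing a with
  | nil => simp at hx
  | cons y t ih =>
    simp only [List.foldl_cons]
    rcases List.mem_cons.mp hx with rfl | hxt
    · exact le_trans (dec_fold_le_init g t _ hg) (hc a)
    · exact ih _ hxt

lemma dec_fold_cases (g : Int → Int → Int) (Q : Int → Prop) (l : List Int) (a : Int)
    (h : ∀ m x, x ∈ l → g m x = m ∨ Q (g m x)) : l.foldl g a = a ∨ Q (l.foldl g a) := by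
  induction l generalizing a with
  | nil => exact Or.inl rfl
  | cons y t ih =>
    simp only [List.foldl_cons]
    have ht : ∀ m x, x ∈ t → g m x = m ∨ Q (g m x) :=
      fun m x hx => h m x (List.mem_cons_of_mem _ hx)
    rcases h a y (List.mem_cons_self ..) with h1 | h1
    · rw [h1]; exact ih a ht
    · rcases ih (g a y) ht with h2 | h2
      · right; rw [h2]; exact h1
      · right; exact h2

lemma slice_sum_eq (array : List Int) (q p : Nat) (h : q ≤ p) :
    (PySem.List.slice array (some (q : Int)) (some (p : Int))).sum = preS array p - preS array q := by
  rw [PySem.List.slice_natCast]; exact sum_take_sub array q p h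

lemma A_facts (array : List Int) (k : Int) :
    MInv array k array.length (in_n_cube array k) := by
  have hA : in_n_cube array k =
      (PySem.List.pyRange 0 (array.length : Int) 1).foldl
        (fun minLen i =>
          (PySem.List.pyRange i (array.length : Int) 1).foldl
            (fun ml j =>
              if PySem.Int.mod ((PySem.List.slice array (some i) (some (j + 1))).sum) k = 0 ∧ j - i + 1 < ml
              then j - i + 1 else ml) minLen) ((array.length : Int) + 1) := rfl
  have hg : ∀ (m i : Int),
      (PySem.List.pyRange i (array.length : Int) 1).foldl
        (fun ml j =>
          if PySem.Int.mod ((PySem.List.slice array (some i) (some (j + 1))).sum) k = 0 ∧ j - i + 1 < ml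
          then j - i + 1 else ml) m ≤ m :=
    fun m i => min_fold_le_init _ _ _ _
  unfold MInv
  refine ⟨?_, ?_, ?_⟩
  · rw [hA]; exact dec_fold_le_init _ _ _ hg
  · intro q p hvp _
    obtain ⟨hqp, hpl, hdvd⟩ := hvp
    rw [hA]
    refine dec_fold_le_mem _ _ _ hg ((q : Nat) : Int) ?_ _ ?_
    · exact (PySem.List.mem_pyRange_one).mpr ⟨by omega, by omega⟩
    · intro m
      have hmem : ((p : Int) - 1) ∈ PySem.List.pyRange ((q : Nat) : Int) (array.length : Int) 1 :=
        (PySem.List.mem_pyRange_one).mpr ⟨by omega, by omega⟩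
      have hP : PySem.Int.mod ((PySem.List.slice array (some ((q : Nat) : Int)) (some ((p : Int) - 1 + 1))).sum) k = 0 := by
        rw [show ((p : Int) - 1 + 1) = (p : Int) by ring, slice_sum_eq array q p (le_of_lt hqp)]
        exact (PySem.Int.mod_eq_zero_iff_dvd _ _).mpr hdvd
      have h := min_fold_le_mem
        (fun j => PySem.Int.mod ((PySem.List.slice array (some ((q : Nat) : Int)) (some (j + 1))).sum) k = 0)
        (fun j => j - (q : Int) + 1) _ m _ hmem hP
      simp only at h
      omega
  · rw [hA]
    have h := dec_fold_cases
      (fun minLen i =>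
        (PySem.List.pyRange i (array.length : Int) 1).foldl
          (fun ml j =>
            if PySem.Int.mod ((PySem.List.slice array (some i) (some (j + 1))).sum) k = 0 ∧ j - i + 1 < ml
            then j - i + 1 else ml) minLen)
      (fun m => ∃ q p, VP array k q p ∧ m = (p : Int) - (q : Int))
      (PySem.List.pyRange 0 (array.length : Int) 1) ((array.length : Int) + 1) ?_
    · exact h
    · intro m i hi
      have hi' := (PySem.List.mem_pyRange_one).mp hi
      rcases min_fold_cases
          (fun j => PySem.Int.mod ((PySem.List.slice array (some i) (some (j + 1))).sum) k = 0)
          (fun j => j - i + 1)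
          (PySem.List.pyRange i (array.length : Int) 1) m with hc | ⟨j, hj, hPj, hfj⟩
      · left; exact hc
      · right
        have hj' := (PySem.List.mem_pyRange_one).mp hj
        have hiq : ((i.toNat : Nat) : Int) = i := Int.toNat_of_nonneg hi'.1
        have hjn : ((j.toNat : Nat) : Int) = j := Int.toNat_of_nonneg (le_trans hi'.1 hj'.1)
        refine ⟨i.toNat, j.toNat + 1, ⟨by omega, by omega, ?_⟩, ?_⟩
        · have hP2 : PySem.Int.mod ((PySem.List.slice array (some ((i.toNat : Nat) : Int)) (some (((j.toNat + 1 : Nat) : Int)))).sum) k = 0 := by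
            rw [show (((j.toNat + 1 : Nat) : Int)) = j + 1 by omega, hiq]
            exact hPj
          rw [slice_sum_eq array i.toNat (j.toNat + 1) (by omega)] at hP2
          exact (PySem.Int.mod_eq_zero_iff_dvd _ _).mp hP2
        · beta_reduce; rw [hfj]; omega

lemma B_loop (array : List Int) (k : Int) (hk : k ≠ 0) :
    ∀ (rest : List Int) (p : Nat) (m : Int) (d : PySem.Dict Int Int),
      rest = array.drop p → p ≤ array.length →
      MInv array k p m → DInv array k p d →
      MInv array k array.length ((rest.foldl (bStep k) (m, d, preS array p, (p : Int))).1) := by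
  intro rest
  induction rest with
  | nil =>
    intro p m d hrest hp hm hd
    have hlen : array.length ≤ p := List.drop_eq_nil_iff.mp hrest.symm
    have hpe : p = array.length := le_antisymm hp hlen
    rw [← hpe]
    simpa using hm
  | cons x t ih =>
    intro p m d hrest hp hm hd
    have hplt : p < array.length := by
      by_contra hcon
      have h0 : array.drop p = [] := List.drop_eq_nil_iff.mpr (by omega)
      rw [← hrest] at h0; simp at h0
    have hdrop : array.drop (p + 1) = t := by
      have h1 : (array.drop p).drop 1 = t := by rw [← hrest]; rfl
      rw [List.drop_drop] at h1
      convert h1 using 2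
    have hxel : array[p]'hplt = x := by
      have h2 : (array.drop p)[0]'(by rw [← hrest]; simp) = x := by
        simp [← hrest]
      rw [List.getElem_drop] at h2
      convert h2 using 2
    have hpre : preS array (p + 1) = preS array p + x := by
      unfold preS
      rw [List.sum_take_succ array p hplt, hxel]
    have hc1 : ((p + 1 : Nat) : Int) = (p : Int) + 1 := by push_cast; ring
    obtain ⟨hm1, hm2, hm3⟩ := hm
    obtain ⟨hds, hdc⟩ := hd
    -- the remainder of the new prefix sum
    have hd' : DInv array k (p + 1)
        (d.insert (PySem.Int.mod (preS array (p + 1)) k) (((p + 1 : Nat)) : Int)) := by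
      constructor
      · intro r' v hv
        rw [PySem.Dict.get?_insert] at hv
        split_ifs at hv with he
        · exact ⟨p + 1, le_refl _, by simpa using hv.symm, by rw [he]⟩
        · obtain ⟨q, hq, hvq, hmq⟩ := hds r' v hv
          exact ⟨q, le_trans hq (Nat.le_succ p), hvq, hmq⟩
      · intro q hq
        by_cases hmq : PySem.Int.mod (preS array q) k = PySem.Int.mod (preS array (p + 1)) k
        · refine ⟨((p + 1 : Nat) : Int), ?_, by exact_mod_cast Int.ofNat_le.mpr hq⟩
          rw [hmq, PySem.Dict.get?_insert, if_pos rfl]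
        · have hq' : q ≤ p := by
            rcases Nat.lt_or_ge q (p + 1) with h | h
            · omega
            · exfalso
              have hqe : q = p + 1 := by omega
              rw [hqe] at hmq
              exact hmq rfl
          obtain ⟨v, hv, hqv⟩ := hdc q hq'
          exact ⟨v, by rw [PySem.Dict.get?_insert, if_neg hmq]; exact hv, hqv⟩
    have hmodpair : ∀ q : Nat, q < p + 1 → VP array k q (p + 1) →
        PySem.Int.mod (preS array q) k = PySem.Int.mod (preS array (p + 1)) k := by
      intro q _ hvp
      exact (mod_eq_mod_iff_dvd _ _ k hk).mpr (dvd_sub_comm.mp hvp.2.2)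
    simp only [List.foldl_cons]
    rcases hget : d.get? (PySem.Int.mod (preS array (p + 1)) k) with _ | v
    · -- remainder not seen before: min_len unchanged
      have hstep : bStep k (m, d, preS array p, (p : Int)) x =
          (m, d.insert (PySem.Int.mod (preS array (p + 1)) k) (((p + 1 : Nat)) : Int),
            preS array (p + 1), ((p + 1 : Nat) : Int)) := by
        simp only [bStep, ← hpre, hget, hc1]
      rw [hstep]
      refine ih (p + 1) m _ hdrop.symm hplt ⟨hm1, ?_, hm3⟩ hd'
      intro q p' hvp hple
      rcases Nat.lt_or_ge p' (p + 1) with h | h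
      · exact hm2 q p' hvp (by omega)
      · exfalso
        have hpe : p' = p + 1 := by omega
        subst hpe
        have hq1 : q < p + 1 := hvp.1
        obtain ⟨w, hw, _⟩ := hdc q (by omega)
        rw [hmodpair q hq1 hvp] at hw
        rw [hget] at hw
        simp at hw
    · -- remainder seen at prefix index v: candidate length p+1-v
      have hstep : bStep k (m, d, preS array p, (p : Int)) x =
          ((if (p : Int) + 1 - v < m then (p : Int) + 1 - v else m),
            d.insert (PySem.Int.mod (preS array (p + 1)) k) (((p + 1 : Nat)) : Int),
            preS array (p + 1), ((p + 1 : Nat) : Int)) := by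
        simp only [bStep, ← hpre, hget, hc1]
      rw [hstep]
      obtain ⟨qv, hqvle, hveq, hqvmod⟩ := hds _ _ hget
      refine ih (p + 1) _ _ hdrop.symm hplt ⟨?_, ?_, ?_⟩ hd'
      · split <;> omega
      · intro q p' hvp hple
        rcases Nat.lt_or_ge p' (p + 1) with h | h
        · have := hm2 q p' hvp (by omega)
          split <;> omega
        · have hpe : p' = p + 1 := by omega
          subst hpe
          have hq1 : q < p + 1 := hvp.1
          obtain ⟨w, hw, hqw⟩ := hdc q (by omega)
          rw [hmodpair q hq1 hvp, hget] at hw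
          have hwv : w = v := by injection hw with h; exact h.symm
          rw [hwv] at hqw
          split <;> omega
      · split_ifs with hlt
        · right
          refine ⟨qv, p + 1, ⟨by omega, by omega, ?_⟩, by omega⟩
          exact dvd_sub_comm.mp ((mod_eq_mod_iff_dvd _ _ k hk).mp hqvmod)
        · exact hm3

lemma B_facts (array : List Int) (k : Int) (hk : k ≠ 0) :
    MInv array k array.length (in_n_cube_alt array k) := by
  have hget0 : ∀ r : Int, (PySem.Dict.ofList [((0 : Int), (0 : Int))]).get? r =
      if (0 : Int) = r then some 0 else none := by
    intro r
    rw [show PySem.Dict.ofList [((0 : Int), (0 : Int))] = PySem.Dict.mk [((0 : Int), (0 : Int))] from rfl,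
      PySem.Dict.get?_mk_cons]
    by_cases h : (0 : Int) = r
    · simp [h]
    · simp only [beq_iff_eq, if_neg h]
      simp [PySem.Dict.get?]
  have hmod0 : PySem.Int.mod (preS array 0) k = 0 := by
    unfold preS
    simpa using (PySem.Int.mod_eq_zero_iff_dvd 0 k).mpr (dvd_zero k)
  have hd0 : DInv array k 0 (PySem.Dict.ofList [((0 : Int), (0 : Int))]) := by
    constructor
    · intro r v hv
      rw [hget0] at hv
      by_cases h : (0 : Int) = r
      · rw [if_pos h] at hv
        exact ⟨0, le_refl _, by simpa using hv.symm, by rw [hmod0, h]⟩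
      · rw [if_neg h] at hv
        simp at hv
    · intro q hq
      have hq0 : q = 0 := by omega
      subst hq0
      exact ⟨0, by rw [hmod0, hget0, if_pos rfl], le_refl _⟩
  have hm0 : MInv array k 0 ((array.length : Int) + 1) := by
    refine ⟨le_refl _, ?_, Or.inl rfl⟩
    intro q p hvp hp0
    have := hvp.1
    omega
  have h := B_loop array k hk array 0 ((array.length : Int) + 1)
    (PySem.Dict.ofList [((0 : Int), (0 : Int))]) (by simp) (Nat.zero_le _) hm0 hd0
  simpa [in_n_cube_alt, preS] using h

lemma MInv_unique (array : List Int) (k : Int) (x y : Int)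
    (hx : MInv array k array.length x) (hy : MInv array k array.length y) : x = y := by
  obtain ⟨hx1, hx2, hx3⟩ := hx
  obtain ⟨hy1, hy2, hy3⟩ := hy
  have h1 : x ≤ y := by
    rcases hy3 with rfl | ⟨q, p, hvp, rfl⟩
    · exact hx1
    · exact hx2 q p hvp hvp.2.1
  have h2 : y ≤ x := by
    rcases hx3 with rfl | ⟨q, p, hvp, rfl⟩
    · exact hy1
    · exact hy2 q p hvp hvp.2.1
  omega

-- ===== VERDICT (by name: the statement is the Claim_ definition above) =====
theorem in_n_cube_spec : Claim_equal_in_n_cube := by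
  intro array k _ hpre
  unfold Spec_in_n_cube
  rcases hpre with hk | rfl
  · exact MInv_unique array k _ _ (A_facts array k) (B_facts array k hk)
  · simp [in_n_cube, in_n_cube_alt, PySem.List.pyRange_one_eq_nil]
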